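-- pv_equiv track=rewrite | github.com/Skinz1434/CipherRecon | text_transforms.py | to_bubble
-- ===== SOURCE A (Python) =====
-- def to_bubble(text: str) -> str:
--     """Convert text to bubble letters"""
--     if not text:
--         return ""
--     bubble_map = {
--         'a': 'ⓐ', 'b': 'ⓑ', 'c': 'ⓒ', 'd': 'ⓓ', 'e': 'ⓔ', 'f': 'ⓕ', 'g': 'ⓖ', 'h': 'ⓗ', 'i': 'ⓘ',
--         'j': 'ⓙ', 'k': 'ⓚ', 'l': 'ⓛ', 'm': 'ⓜ', 'n': 'ⓝ', 'o': 'ⓞ', 'p': 'ⓟ', 'q': 'ⓠ', 'r': 'ⓡ',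
--         's': 'ⓢ', 't': 'ⓣ', 'u': 'ⓤ', 'v': 'ⓥ', 'w': 'ⓦ', 'x': 'ⓧ', 'y': 'ⓨ', 'z': 'ⓩ',
--         'A': 'Ⓐ', 'B': 'Ⓑ', 'C': 'Ⓒ', 'D': 'Ⓓ', 'E': 'Ⓔ', 'F': 'Ⓕ', 'G': 'Ⓖ', 'H': 'Ⓗ', 'I': 'Ⓘ',
--         'J': 'Ⓙ', 'K': 'Ⓚ', 'L': 'Ⓛ', 'M': 'Ⓜ', 'N': 'Ⓝ', 'O': 'Ⓞ', 'P': 'Ⓟ', 'Q': 'Ⓠ', 'R': 'Ⓡ',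
--         'S': 'Ⓢ', 'T': 'Ⓣ', 'U': 'Ⓤ', 'V': 'Ⓥ', 'W': 'Ⓦ', 'X': 'Ⓧ', 'Y': 'Ⓨ', 'Z': 'Ⓩ',
--         ' ': ' '
--     }
--     return ''.join(bubble_map.get(c, c) for c in text)
-- ===== SOURCE B (Python) =====
-- def to_bubble(text: str) -> str:
--     """Convert text to bubble letters (26 alphabet passes of str.replace)."""
--     for i in range(26):
--         text = text.replace(chr(0x61 + i), chr(0x24D0 + i))
--         text = text.replace(chr(0x41 + i), chr(0x24B6 + i))
--     return text
-- ===== Notes on version B (the rewrite author's own statement) =====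
-- stated objective: faster
-- what changed: Instead of one Python-level pass over the text looking each character up in a 53-entry dict, B loops over the 26 alphabet positions and rewrites the whole text with two str.replace passes per position (correct because the circled replacements are never matched by later ASCII patterns); the per-character work moves into C-level str.replace.
import Mathlib
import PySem

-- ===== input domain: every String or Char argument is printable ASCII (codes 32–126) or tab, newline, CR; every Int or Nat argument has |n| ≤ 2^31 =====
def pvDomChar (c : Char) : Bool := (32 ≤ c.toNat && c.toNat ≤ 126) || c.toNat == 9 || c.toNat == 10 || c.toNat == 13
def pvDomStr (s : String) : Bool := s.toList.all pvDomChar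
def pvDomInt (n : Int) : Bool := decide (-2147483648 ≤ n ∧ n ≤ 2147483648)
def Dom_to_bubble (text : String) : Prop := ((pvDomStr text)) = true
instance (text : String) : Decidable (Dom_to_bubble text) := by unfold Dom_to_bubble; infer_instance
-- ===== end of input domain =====

-- B replaces A's single-pass 53-entry dict lookup by 26 whole-text str.replace passes over the alphabet (a different algorithm; a timing run measured it faster).
set_option maxRecDepth 8000


-- ===== PORT A =====
-- the literal 53-entry dict from A
def bubbleMap : PySem.Dict Char Char := PySem.Dict.ofList
  [('a', 'ⓐ'), ('b', 'ⓑ'), ('c', 'ⓒ'), ('d', 'ⓓ'), ('e', 'ⓔ'), ('f', 'ⓕ'), ('g', 'ⓖ'), ('h', 'ⓗ'), ('i', 'ⓘ'),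
   ('j', 'ⓙ'), ('k', 'ⓚ'), ('l', 'ⓛ'), ('m', 'ⓜ'), ('n', 'ⓝ'), ('o', 'ⓞ'), ('p', 'ⓟ'), ('q', 'ⓠ'), ('r', 'ⓡ'),
   ('s', 'ⓢ'), ('t', 'ⓣ'), ('u', 'ⓤ'), ('v', 'ⓥ'), ('w', 'ⓦ'), ('x', 'ⓧ'), ('y', 'ⓨ'), ('z', 'ⓩ'),
   ('A', 'Ⓐ'), ('B', 'Ⓑ'), ('C', 'Ⓒ'), ('D', 'Ⓓ'), ('E', 'Ⓔ'), ('F', 'Ⓕ'), ('G', 'Ⓖ'), ('H', 'Ⓗ'), ('I', 'Ⓘ'),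
   ('J', 'Ⓙ'), ('K', 'Ⓚ'), ('L', 'Ⓛ'), ('M', 'Ⓜ'), ('N', 'Ⓝ'), ('O', 'Ⓞ'), ('P', 'Ⓟ'), ('Q', 'Ⓠ'), ('R', 'Ⓡ'),
   ('S', 'Ⓢ'), ('T', 'Ⓣ'), ('U', 'Ⓤ'), ('V', 'Ⓥ'), ('W', 'Ⓦ'), ('X', 'Ⓧ'), ('Y', 'Ⓨ'), ('Z', 'Ⓩ'),
   (' ', ' ')]

def to_bubble (text : String) : String :=
  if text = "" then ""
  else String.ofList (text.toList.map (fun c => bubbleMap.getD c c))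

-- ===== PORT B =====
-- Source B's loop body: two str.replace passes for alphabet position i
def bubbleStep (t : String) (i : Int) : String :=
  let t1 := PySem.Str.replace t (String.ofList [Char.ofNat (0x61 + i).toNat]) (String.ofList [Char.ofNat (0x24D0 + i).toNat])
  PySem.Str.replace t1 (String.ofList [Char.ofNat (0x41 + i).toNat]) (String.ofList [Char.ofNat (0x24B6 + i).toNat])

def to_bubble_alt (text : String) : String :=
  (PySem.List.pyRange 0 26 1).foldl bubbleStep text

-- ===== PRECONDITION & SPEC =====
def Spec_to_bubble (text : String) (out : String) : Prop := out = to_bubble_alt text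
instance (text : String) (out : String) : Decidable (Spec_to_bubble text out) := by unfold Spec_to_bubble; infer_instance

-- ===== CLAIM =====
def Claim_equal_to_bubble : Prop := ∀ (text : String), Dom_to_bubble text → Spec_to_bubble text (to_bubble text)

-- ===== LEMMAS AND PROOFS =====

-- substitution of one character
def subst (p r c : Char) : Char := if c = p then r else c

-- the per-character effect of bubbleStep i
def bubbleF (i : Int) (c : Char) : Char :=
  subst (Char.ofNat (0x41 + i).toNat) (Char.ofNat (0x24B6 + i).toNat)
    (subst (Char.ofNat (0x61 + i).toNat) (Char.ofNat (0x24D0 + i).toNat) c)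

lemma go_single (p r : Char) : ∀ (l acc : List Char),
    PySem.Chars.replace.go [p] [r] l.length l acc = acc.reverse ++ l.map (subst p r) := by
  intro l
  induction l with
  | nil => intro acc; simp [PySem.Chars.replace.go]
  | cons c t ih =>
      intro acc
      rw [List.length_cons, PySem.Chars.replace.go]
      by_cases h : c = p
      · subst h; simp [List.isPrefixOf, ih, subst]
      · simp [List.isPrefixOf, h, ih, subst, Ne.symm h]

lemma replace_single (p r : Char) (l : List Char) :
    PySem.Chars.replace l [p] [r] = l.map (subst p r) := by
  simpa [PySem.Chars.replace] using go_single p r l []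

lemma toList_bubbleStep (t : String) (i : Int) :
    (bubbleStep t i).toList = t.toList.map (bubbleF i) := by
  simp only [bubbleStep, PySem.Str.toList_replace, String.toList_ofList, replace_single,
    List.map_map]
  rfl

lemma foldl_map_comm {X : Type} (f : X → Char → Char) :
    ∀ (ps : List X) (l : List Char),
    ps.foldl (fun acc x => acc.map (f x)) l = l.map (fun c => ps.foldl (fun c x => f x c) c) := by
  intro ps
  induction ps with
  | nil => intro l; simp
  | cons p t ih => intro l; simp [ih, List.map_map, Function.comp]

lemma toList_alt (text : String) :
    (to_bubble_alt text).toList =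
      text.toList.map (fun c => (PySem.List.pyRange 0 26 1).foldl (fun c i => bubbleF i c) c) := by
  unfold to_bubble_alt
  rw [← foldl_map_comm]
  generalize PySem.List.pyRange 0 26 1 = is
  induction is generalizing text with
  | nil => rfl
  | cons i t ih => simp [List.foldl_cons, ih, toList_bubbleStep]

-- the two per-character maps agree on every ASCII code point (checked exhaustively)
lemma bubble_range : ∀ n ∈ List.range 127,
    bubbleMap.getD (Char.ofNat n) (Char.ofNat n) =
      (PySem.List.pyRange 0 26 1).foldl (fun c i => bubbleF i c) (Char.ofNat n) := by decide

lemma bubble_char_eq (c : Char) (h : pvDomChar c = true) :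
    bubbleMap.getD c c = (PySem.List.pyRange 0 26 1).foldl (fun c i => bubbleF i c) c := by
  have hle : c.toNat < 127 := by
    simp only [pvDomChar, Bool.or_eq_true, Bool.and_eq_true, decide_eq_true_eq, beq_iff_eq] at h
    omega
  have := bubble_range c.toNat (List.mem_range.mpr hle)
  rwa [Char.ofNat_toNat] at this

theorem to_bubble_spec_aux (text : String) (h : Dom_to_bubble text) :
    to_bubble text = to_bubble_alt text := by
  rw [← String.toList_inj]
  unfold to_bubble
  split
  · rename_i he; subst he; rfl
  · rw [toList_alt]
    simp only [String.toList_ofList]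
    apply List.map_congr_left
    intro c hc
    exact bubble_char_eq c (List.all_eq_true.mp h c hc)

-- ===== VERDICT =====
theorem to_bubble_spec : Claim_equal_to_bubble := fun t h => to_bubble_spec_aux t h
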